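-- pv_equiv track=rewrite | github.com/namratapadmanabhan/15112termproject | playerRulesCheck.py | checkCurrRow
-- ===== SOURCE A (Python) =====
-- def checkCurrRow(currBoard):
--     length = len(currBoard)
--     row = currBoard[0]//15
--     for cell in range(length):
--         currCell = currBoard[cell]
--         if row != currCell//15:
--             return (False, 0)
--     return (True, row)
-- ===== SOURCE B (Python) =====
-- def checkCurrRow(currBoard):
--     row = currBoard[0] // 15
--     if min(currBoard) // 15 == max(currBoard) // 15:
--         return (True, row)
--     return (False, 0)
-- ===== Notes on version B (the rewrite author's own statement) =====
-- stated objective: alternative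
-- what changed: Instead of scanning and comparing each cell's row against a reference with early exit, B computes the board's minimum and maximum cell and uses monotonicity of //15 to decide: all cells lie in one row iff min and max do.
import Mathlib
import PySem

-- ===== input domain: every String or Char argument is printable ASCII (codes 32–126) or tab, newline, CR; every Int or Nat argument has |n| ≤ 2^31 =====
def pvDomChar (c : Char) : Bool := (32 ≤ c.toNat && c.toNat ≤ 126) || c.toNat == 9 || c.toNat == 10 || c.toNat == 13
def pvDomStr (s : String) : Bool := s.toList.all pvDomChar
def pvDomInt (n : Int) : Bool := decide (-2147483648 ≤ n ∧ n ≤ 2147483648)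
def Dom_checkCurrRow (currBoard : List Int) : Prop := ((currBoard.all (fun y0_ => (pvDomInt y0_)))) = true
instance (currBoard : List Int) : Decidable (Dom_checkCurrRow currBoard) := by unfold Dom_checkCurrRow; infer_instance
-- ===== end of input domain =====

-- B replaces A's reference-comparison scan by a min/max computation: by monotonicity
-- of //15 all cells share one row iff the minimum and maximum cell do (objective: alternative).

-- ===== PORT A =====
-- the for-loop over range(length) indexing currBoard[cell]: structural recursion over the cells in order
def checkCurrRowLoopA (row : Int) : List Int → Bool × Int
  | [] => (true, row)
  | currCell :: rest =>
      if row ≠ PySem.Int.floordiv currCell 15 then (false, 0)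
      else checkCurrRowLoopA row rest

def checkCurrRow (currBoard : List Int) : Bool × Int :=
  match PySem.List.pyGet? currBoard 0 with
  | none => (false, 0)  -- unreachable inside Pre_: Python raises IndexError here
  | some h => checkCurrRowLoopA (PySem.Int.floordiv h 15) currBoard

-- ===== PORT B =====
def checkCurrRow_alt (currBoard : List Int) : Bool × Int :=
  match PySem.List.pyGet? currBoard 0 with
  | none => (false, 0)  -- unreachable inside Pre_: Python raises IndexError here
  | some h =>
      let row := PySem.Int.floordiv h 15
      match PySem.List.min? currBoard (fun x => x), PySem.List.max? currBoard (fun x => x) with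
      | some mn, some mx =>
          if PySem.Int.floordiv mn 15 == PySem.Int.floordiv mx 15 then (true, row)
          else (false, 0)
      | _, _ => (false, 0)  -- unreachable: the list is nonempty here

-- ===== PRECONDITION & SPEC =====
-- A (and B) raise IndexError on the empty board when reading the first cell; Pre_ excludes exactly the empty list.
def Pre_checkCurrRow (currBoard : List Int) : Prop := currBoard ≠ []
instance (currBoard : List Int) : Decidable (Pre_checkCurrRow currBoard) := by unfold Pre_checkCurrRow; infer_instance
def pvWitness_checkCurrRow : List Int := [16, 17]

def Spec_checkCurrRow (currBoard : List Int) (out : Bool × Int) : Prop := out = checkCurrRow_alt currBoard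
instance (currBoard : List Int) (out : Bool × Int) : Decidable (Spec_checkCurrRow currBoard out) := by unfold Spec_checkCurrRow; infer_instance

-- ===== CLAIM (what is proved, stated in full; the proofs are below) =====
def Claim_equal_checkCurrRow : Prop := ∀ (currBoard : List Int), Dom_checkCurrRow currBoard → Pre_checkCurrRow currBoard → Spec_checkCurrRow currBoard (checkCurrRow currBoard)

-- ===== LEMMAS AND PROOFS =====

-- A's loop returns (true,row) iff every cell's row equals row, else (false,0)
theorem loopA_eq_all (row : Int) (l : List Int) :
    checkCurrRowLoopA row l =
      if l.all (fun c => PySem.Int.floordiv c 15 == row) then (true, row) else (false, 0) := by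
  induction l with
  | nil => simp [checkCurrRowLoopA]
  | cons c rest ih =>
      by_cases h1 : row = PySem.Int.floordiv c 15
      · have hb : (PySem.Int.floordiv c 15 == row) = true := beq_iff_eq.mpr h1.symm
        simp only [checkCurrRowLoopA, List.all_cons, ih, hb, Bool.true_and]
        rw [if_neg (fun hne => hne h1)]
      · have hb : (PySem.Int.floordiv c 15 == row) = false :=
          beq_eq_false_iff_ne.mpr (fun hc => h1 hc.symm)
        simp only [checkCurrRowLoopA, List.all_cons, hb, Bool.false_and]
        rw [if_pos h1, if_neg (by simp)]

-- //15 is monotone (floor division by a positive divisor)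
theorem floordiv15_mono {a b : Int} (h : a ≤ b) :
    PySem.Int.floordiv a 15 ≤ PySem.Int.floordiv b 15 := by
  rw [PySem.Int.floordiv_eq_ediv_of_pos (by norm_num), PySem.Int.floordiv_eq_ediv_of_pos (by norm_num)]
  exact Int.ediv_le_ediv (by norm_num) h

-- ===== VERDICT (by name: the statement is the Claim_ definition above) =====
theorem checkCurrRow_spec : Claim_equal_checkCurrRow := by
  intro currBoard _ hpre
  match currBoard with
  | [] => exact absurd rfl hpre
  | h :: t =>
      have hget : PySem.List.pyGet? (h :: t) 0 = some h := by simp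
      obtain ⟨mn, hmn⟩ : ∃ m, PySem.List.min? (h :: t) (fun x => x) = some m := by
        cases hm : PySem.List.min? (h :: t) (fun x => x) with
        | none => exact absurd ((PySem.List.min?_eq_none_iff _ _).mp hm) (by simp)
        | some m => exact ⟨m, rfl⟩
      obtain ⟨mx, hmx⟩ : ∃ m, PySem.List.max? (h :: t) (fun x => x) = some m := by
        cases hm : PySem.List.max? (h :: t) (fun x => x) with
        | none => exact absurd ((PySem.List.max?_eq_none_iff _ _).mp hm) (by simp)
        | some m => exact ⟨m, rfl⟩
      have hmnMem : mn ∈ h :: t := PySem.List.min?_mem hmn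
      have hmxMem : mx ∈ h :: t := PySem.List.max?_mem hmx
      have hmnMin : ∀ y ∈ h :: t, mn ≤ y := PySem.List.min?_isMin hmn
      have hmxMax : ∀ y ∈ h :: t, y ≤ mx := PySem.List.max?_isMax hmx
      show checkCurrRow (h :: t) = checkCurrRow_alt (h :: t)
      unfold checkCurrRow checkCurrRow_alt
      rw [hget]
      simp only [hmn, hmx, loopA_eq_all]
      set row := PySem.Int.floordiv h 15 with hrow
      by_cases hall : ((h :: t).all fun c => PySem.Int.floordiv c 15 == row) = true
      · -- all rows equal row, so min and max rows equal
        have hr : ∀ y ∈ h :: t, PySem.Int.floordiv y 15 = row := by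
          intro y hy
          exact beq_iff_eq.mp (List.all_eq_true.mp hall y hy)
        have heq : (PySem.Int.floordiv mn 15 == PySem.Int.floordiv mx 15) = true := by
          rw [hr mn hmnMem, hr mx hmxMem]; exact beq_self_eq_true row
        rw [hall, if_pos rfl, heq, if_pos rfl]
      · -- some row differs, so min and max rows differ
        have hne : (PySem.Int.floordiv mn 15 == PySem.Int.floordiv mx 15) = false := by
          refine beq_eq_false_iff_ne.mpr fun hc => hall ?_
          refine List.all_eq_true.mpr fun c hc' => beq_iff_eq.mpr ?_
          have h1 := floordiv15_mono (hmnMin c hc')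
          have h2 := floordiv15_mono (hmxMax c hc')
          have h3 := floordiv15_mono (hmnMin h (by simp))
          have h4 := floordiv15_mono (hmxMax h (by simp))
          rw [hrow]; omega
        rw [eq_false_of_ne_true hall, if_neg (by simp), hne, if_neg (by simp)]
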